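-- pv_equiv track=rewrite | github.com/fahri314/365-Defender-Monthly-Report | main.py | group_device_os_types
-- ===== SOURCE A (Python) =====
-- def group_device_os_types(devices):
--     os_groups = {
--         "Windows Client": [],
--         "Windows Server": [],
--         "Linux": [],
--         "Android": [],
--         "macOS": [],
--         "iOS": [],
--         "Other": []
--     }
--
--     for device in devices:
--         os = device.get("OsPlatform", "Unspecified")
--         if os == None:
--             continue
--         if "Server" in os:
--             os_groups["Windows Server"].append(device)
--         elif "WindowsXP" in os:
--             os_groups["Windows Client"].append(device)
--         elif "Windows7" in os:
--             os_groups["Windows Client"].append(device)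
--         elif "Windows8" in os:
--             os_groups["Windows Client"].append(device)
--         elif "Windows10" in os:
--             os_groups["Windows Client"].append(device)
--         elif "Windows11" in os:
--             os_groups["Windows Client"].append(device)
--         elif "Windows12" in os:
--             os_groups["Windows Client"].append(device)
--         elif "Linux" in os:
--             os_groups["Linux"].append(device)
--         elif "Android" in os:
--             os_groups["Android"].append(device)
--         elif "macOS" in os:
--             os_groups["macOS"].append(device)
--         elif "iOS" in os:
--             os_groups["iOS"].append(device)
--         else:
--             os_groups["Other"].append(device)
--     return os_groups
-- ===== SOURCE B (Python) =====
-- KEYS = ["Windows Client", "Windows Server", "Linux", "Android", "macOS", "iOS", "Other"]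
--
-- WINDOWS_CLIENT_VERSIONS = ("WindowsXP", "Windows7", "Windows8",
--                            "Windows10", "Windows11", "Windows12")
-- NAMED = ("Linux", "Android", "macOS", "iOS")
--
--
-- def _bucket(device):
--     os = device.get("OsPlatform", "Unspecified")
--     if os is None:
--         return None
--     if "Server" in os:
--         return "Windows Server"
--     if any(v in os for v in WINDOWS_CLIENT_VERSIONS):
--         return "Windows Client"
--     for name in NAMED:
--         if name in os:
--             return name
--     return "Other"
--
--
-- def group_device_os_types(devices):
--     # staged: one labeling pass, then one filter pass per bucket
--     labeled = [(_bucket(d), d) for d in devices]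
--     return {k: [d for b, d in labeled if b == k] for k in KEYS}
-- ===== Notes on version B (the rewrite author's own statement) =====
-- stated objective: alternative
-- what changed: Instead of A's single pass that appends each device into a mutable bucket dict through a 12-branch elif cascade, B first labels every device with its bucket (collapsing the six Windows-client branches into one any() and the four named OSes into a first-match loop), then builds the result dict by a comprehension that filters the labeled list once per bucket key.
import Mathlib
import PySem

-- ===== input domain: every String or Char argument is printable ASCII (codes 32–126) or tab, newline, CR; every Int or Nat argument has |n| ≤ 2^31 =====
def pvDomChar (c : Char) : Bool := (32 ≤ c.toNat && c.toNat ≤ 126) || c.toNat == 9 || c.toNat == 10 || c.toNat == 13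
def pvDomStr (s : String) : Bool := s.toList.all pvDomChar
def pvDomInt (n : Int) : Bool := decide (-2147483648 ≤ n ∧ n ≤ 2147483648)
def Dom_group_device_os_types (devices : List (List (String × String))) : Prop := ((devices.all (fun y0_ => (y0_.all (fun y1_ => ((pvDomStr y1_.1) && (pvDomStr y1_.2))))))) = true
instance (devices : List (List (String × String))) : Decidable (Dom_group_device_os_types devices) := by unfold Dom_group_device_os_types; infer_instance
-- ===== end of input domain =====

-- ===== PORT A =====
-- A: one pass that appends each device into a mutable bucket dict through a 12-branch elif
-- cascade; B: a labeling pass over the devices followed by one filter pass per bucket key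
-- (alternative decomposition, same results).

-- device.get("OsPlatform", "Unspecified")
def pvGetOs (device : List (String × String)) : String :=
  (PySem.Dict.mk device).getD "OsPlatform" "Unspecified"

def pvInitA : PySem.Dict String (List (List (String × String))) :=
  PySem.Dict.ofList
    [("Windows Client", []), ("Windows Server", []), ("Linux", []), ("Android", []),
     ("macOS", []), ("iOS", []), ("Other", [])]

-- one iteration of A's for-loop (the 'os == None' branch is unreachable for str values)
def pvStepA (d : PySem.Dict String (List (List (String × String))))
    (device : List (String × String)) : PySem.Dict String (List (List (String × String))) :=
  if PySem.Str.isIn "Server" (pvGetOs device) then d.modify "Windows Server" [] (· ++ [device])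
  else if PySem.Str.isIn "WindowsXP" (pvGetOs device) then d.modify "Windows Client" [] (· ++ [device])
  else if PySem.Str.isIn "Windows7" (pvGetOs device) then d.modify "Windows Client" [] (· ++ [device])
  else if PySem.Str.isIn "Windows8" (pvGetOs device) then d.modify "Windows Client" [] (· ++ [device])
  else if PySem.Str.isIn "Windows10" (pvGetOs device) then d.modify "Windows Client" [] (· ++ [device])
  else if PySem.Str.isIn "Windows11" (pvGetOs device) then d.modify "Windows Client" [] (· ++ [device])
  else if PySem.Str.isIn "Windows12" (pvGetOs device) then d.modify "Windows Client" [] (· ++ [device])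
  else if PySem.Str.isIn "Linux" (pvGetOs device) then d.modify "Linux" [] (· ++ [device])
  else if PySem.Str.isIn "Android" (pvGetOs device) then d.modify "Android" [] (· ++ [device])
  else if PySem.Str.isIn "macOS" (pvGetOs device) then d.modify "macOS" [] (· ++ [device])
  else if PySem.Str.isIn "iOS" (pvGetOs device) then d.modify "iOS" [] (· ++ [device])
  else d.modify "Other" [] (· ++ [device])

def group_device_os_types (devices : List (List (String × String))) : List (String × List (List (String × String))) :=
  (devices.foldl pvStepA pvInitA).items

-- ===== PORT B =====
def pvKeys : List String :=
  ["Windows Client", "Windows Server", "Linux", "Android", "macOS", "iOS", "Other"]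

def pvWinClientVersions : List String :=
  ["WindowsXP", "Windows7", "Windows8", "Windows10", "Windows11", "Windows12"]

def pvNamed : List String := ["Linux", "Android", "macOS", "iOS"]

-- _bucket(device); the 'os is None' branch is unreachable for str values
def pvBucket (device : List (String × String)) : String :=
  if PySem.Str.isIn "Server" (pvGetOs device) then "Windows Server"
  else if pvWinClientVersions.any (fun v => PySem.Str.isIn v (pvGetOs device)) then "Windows Client"
  else match pvNamed.find? (fun name => PySem.Str.isIn name (pvGetOs device)) with
    | some name => name
    | none => "Other"

def group_device_os_types_alt (devices : List (List (String × String))) : List (String × List (List (String × String))) :=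
  let labeled := devices.map (fun d => (pvBucket d, d))
  pvKeys.map (fun k => (k, (labeled.filter (fun p => p.1 == k)).map (·.2)))

-- ===== PRECONDITION & SPEC =====
def Spec_group_device_os_types (devices : List (List (String × String))) (out : List (String × List (List (String × String)))) : Prop := out = group_device_os_types_alt devices
instance (devices : List (List (String × String))) (out : List (String × List (List (String × String)))) : Decidable (Spec_group_device_os_types devices out) := by unfold Spec_group_device_os_types; infer_instance

-- ===== CLAIM (what is proved, stated in full; the proofs are below) =====
def Claim_equal_group_device_os_types : Prop := ∀ (devices : List (List (String × String))), Dom_group_device_os_types devices → Spec_group_device_os_types devices (group_device_os_types devices)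

-- ===== LEMMAS AND PROOFS =====
-- B's staged classifier returns exactly the bucket of A's elif cascade
theorem pvBucket_eq (device : List (String × String)) :
    pvBucket device =
      (if PySem.Str.isIn "Server" (pvGetOs device) then "Windows Server"
       else if PySem.Str.isIn "WindowsXP" (pvGetOs device) then "Windows Client"
       else if PySem.Str.isIn "Windows7" (pvGetOs device) then "Windows Client"
       else if PySem.Str.isIn "Windows8" (pvGetOs device) then "Windows Client"
       else if PySem.Str.isIn "Windows10" (pvGetOs device) then "Windows Client"
       else if PySem.Str.isIn "Windows11" (pvGetOs device) then "Windows Client"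
       else if PySem.Str.isIn "Windows12" (pvGetOs device) then "Windows Client"
       else if PySem.Str.isIn "Linux" (pvGetOs device) then "Linux"
       else if PySem.Str.isIn "Android" (pvGetOs device) then "Android"
       else if PySem.Str.isIn "macOS" (pvGetOs device) then "macOS"
       else if PySem.Str.isIn "iOS" (pvGetOs device) then "iOS"
       else "Other") := by
  unfold pvBucket pvWinClientVersions pvNamed
  cases h1 : PySem.Str.isIn "Server" (pvGetOs device) <;> simp only [if_true, if_false, Bool.false_eq_true, List.any_cons, List.any_nil, Bool.or_false, List.find?]
  cases h2 : PySem.Str.isIn "WindowsXP" (pvGetOs device) <;> simp only [if_false, Bool.false_eq_true, Bool.true_or, Bool.false_or, if_pos]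
  cases h3 : PySem.Str.isIn "Windows7" (pvGetOs device) <;> simp only [Bool.false_eq_true, Bool.true_or, Bool.false_or, reduceIte]
  cases h4 : PySem.Str.isIn "Windows8" (pvGetOs device) <;> simp only [Bool.false_eq_true, Bool.true_or, Bool.false_or, reduceIte]
  cases h5 : PySem.Str.isIn "Windows10" (pvGetOs device) <;> simp only [Bool.false_eq_true, Bool.true_or, Bool.false_or, reduceIte]
  cases h6 : PySem.Str.isIn "Windows11" (pvGetOs device) <;> simp only [Bool.false_eq_true, Bool.true_or, Bool.false_or, reduceIte]
  cases h7 : PySem.Str.isIn "Windows12" (pvGetOs device) <;> simp only [Bool.false_eq_true, reduceIte]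
  cases h8 : PySem.Str.isIn "Linux" (pvGetOs device) <;> simp only [Bool.false_eq_true, reduceIte]
  cases h9 : PySem.Str.isIn "Android" (pvGetOs device) <;> simp only [Bool.false_eq_true, reduceIte]
  cases h10 : PySem.Str.isIn "macOS" (pvGetOs device) <;> simp only [Bool.false_eq_true, reduceIte]
  cases h11 : PySem.Str.isIn "iOS" (pvGetOs device) <;> simp only [Bool.false_eq_true, reduceIte]

-- A's loop body lands the device exactly in bucket pvBucket device
theorem pvStepA_eq (d : PySem.Dict String (List (List (String × String))))
    (device : List (String × String)) :
    pvStepA d device = d.modify (pvBucket device) [] (· ++ [device]) := by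
  rw [pvBucket_eq]
  unfold pvStepA
  cases h1 : PySem.Str.isIn "Server" (pvGetOs device) <;> simp only [Bool.false_eq_true, reduceIte]
  cases h2 : PySem.Str.isIn "WindowsXP" (pvGetOs device) <;> simp only [Bool.false_eq_true, reduceIte]
  cases h3 : PySem.Str.isIn "Windows7" (pvGetOs device) <;> simp only [Bool.false_eq_true, reduceIte]
  cases h4 : PySem.Str.isIn "Windows8" (pvGetOs device) <;> simp only [Bool.false_eq_true, reduceIte]
  cases h5 : PySem.Str.isIn "Windows10" (pvGetOs device) <;> simp only [Bool.false_eq_true, reduceIte]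
  cases h6 : PySem.Str.isIn "Windows11" (pvGetOs device) <;> simp only [Bool.false_eq_true, reduceIte]
  cases h7 : PySem.Str.isIn "Windows12" (pvGetOs device) <;> simp only [Bool.false_eq_true, reduceIte]
  cases h8 : PySem.Str.isIn "Linux" (pvGetOs device) <;> simp only [Bool.false_eq_true, reduceIte]
  cases h9 : PySem.Str.isIn "Android" (pvGetOs device) <;> simp only [Bool.false_eq_true, reduceIte]
  cases h10 : PySem.Str.isIn "macOS" (pvGetOs device) <;> simp only [Bool.false_eq_true, reduceIte]
  cases h11 : PySem.Str.isIn "iOS" (pvGetOs device) <;> simp only [Bool.false_eq_true, reduceIte]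

theorem pvBucket_mem (device : List (String × String)) : pvBucket device ∈ pvKeys := by
  rw [pvBucket_eq]
  cases h1 : PySem.Str.isIn "Server" (pvGetOs device)
  case true => simp [pvKeys]
  simp only [Bool.false_eq_true, reduceIte]
  cases h2 : PySem.Str.isIn "WindowsXP" (pvGetOs device)
  case true => simp [pvKeys]
  simp only [Bool.false_eq_true, reduceIte]
  cases h3 : PySem.Str.isIn "Windows7" (pvGetOs device)
  case true => simp [pvKeys]
  simp only [Bool.false_eq_true, reduceIte]
  cases h4 : PySem.Str.isIn "Windows8" (pvGetOs device)
  case true => simp [pvKeys]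
  simp only [Bool.false_eq_true, reduceIte]
  cases h5 : PySem.Str.isIn "Windows10" (pvGetOs device)
  case true => simp [pvKeys]
  simp only [Bool.false_eq_true, reduceIte]
  cases h6 : PySem.Str.isIn "Windows11" (pvGetOs device)
  case true => simp [pvKeys]
  simp only [Bool.false_eq_true, reduceIte]
  cases h7 : PySem.Str.isIn "Windows12" (pvGetOs device)
  case true => simp [pvKeys]
  simp only [Bool.false_eq_true, reduceIte]
  cases h8 : PySem.Str.isIn "Linux" (pvGetOs device)
  case true => simp [pvKeys]
  simp only [Bool.false_eq_true, reduceIte]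
  cases h9 : PySem.Str.isIn "Android" (pvGetOs device)
  case true => simp [pvKeys]
  simp only [Bool.false_eq_true, reduceIte]
  cases h10 : PySem.Str.isIn "macOS" (pvGetOs device)
  case true => simp [pvKeys]
  simp only [Bool.false_eq_true, reduceIte]
  cases h11 : PySem.Str.isIn "iOS" (pvGetOs device)
  case true => simp [pvKeys]
  simp only [Bool.false_eq_true, reduceIte]
  simp [pvKeys]

theorem pvKeys_update (l : List String) (h : ∀ x ∈ l, x ∈ pvKeys) :
    PySem.Set.update pvKeys l = pvKeys := by
  rw [PySem.Set.update_eq_append_filter]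
  rw [List.filter_eq_nil_iff.2 ?_, List.append_nil]
  intro x hx
  have hx' := h x ((PySem.Set.mem_ofList l x).1 hx)
  simpa using hx'

-- ===== VERDICT (by name: the statement is the Claim_ definition above) =====
set_option maxHeartbeats 1000000 in
theorem group_device_os_types_spec : Claim_equal_group_device_os_types := by
  intro devices _
  unfold Spec_group_device_os_types group_device_os_types group_device_os_types_alt
  have hstep : devices.foldl pvStepA pvInitA
      = (devices.map (fun d => (pvBucket d, d))).foldl
          (fun d p => d.modify p.1 [] (· ++ [p.2])) pvInitA := by
    rw [List.foldl_map]
    exact PySem.List.foldl_congr_mem devices _ _ pvInitA (fun acc x _ => pvStepA_eq acc x)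
  rw [hstep]
  set L := devices.map (fun d => (pvBucket d, d)) with hL
  have hkeys : ((L.foldl (fun d p => d.modify p.1 [] (· ++ [p.2])) pvInitA)).keys = pvKeys := by
    rw [PySem.Dict.keys_foldl_modify_key L (fun p => p.1) [] (fun _ p => (· ++ [p.2])) pvInitA]
    have hinit : pvInitA.keys = pvKeys := by decide
    rw [hinit]
    apply pvKeys_update
    intro x hx
    simp only [hL, List.map_map, List.mem_map] at hx
    obtain ⟨dev, _, rfl⟩ := hx
    exact pvBucket_mem dev
  have hnodup : ((L.foldl (fun d p => d.modify p.1 [] (· ++ [p.2])) pvInitA)).keys.Nodup := by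
    rw [hkeys]; decide
  rw [PySem.Dict.items_eq_map_keys _ hnodup ([] : List (List (String × String))), hkeys]
  apply List.map_congr_left
  intro k hk
  rw [PySem.Dict.getD_foldl_modify_append L pvInitA k]
  have hinitD : pvInitA.getD k [] = [] := by
    fin_cases hk <;> decide
  rw [hinitD, List.nil_append]
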